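-- pv_equiv track=rewrite | github.com/Pimboto/VideoLab | apps/api/_archive_old/ui.py | build_deterministic_unique_jobs
-- ===== SOURCE A (Python) =====
-- def build_deterministic_unique_jobs(vids, auds, rows_used, want):
--     """
--     Deterministic per-video staggered selection:
--       - Cycle through raw videos round-robin so each video gets picks evenly.
--       - For each video `b`, start caption index at (b % C) and audio at (b % A).
--       - For the k-th pick of that same video, advance both indices by +k (wrapping).
--       - Guarantees no repeated (video, caption_idx, audio_idx) within the planned list.
--     """
--     V = len(vids)
--     C = max(1, len(rows_used))
--     A = len(auds) if auds else 1
--     if V == 0: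
--         return []
--     total_possible = V * C * A
--     N = min(want, total_possible)
--
--     # Track how many we have already assigned to each video
--     picks_per_video = [0] * V
--     jobs = []
--
--     # Precompute simple index-able audio list even if None
--     for t in range(N):
--         b = t % V  # which base/video this turn
--         k = picks_per_video[b]  # this video's local pick index
--         picks_per_video[b] += 1
--
--         start_c = b % C
--         cap_idx = (start_c + k) % C
--
--         if auds:
--             start_a = b % A
--             aud_idx = (start_a + k) % A
--             apath = auds[aud_idx]
--         else:
--             apath = None
--
--         vpath = vids[b]
--         segments = rows_used[cap_idx] if C > 0 else []
--         jobs.append((vpath, apath, segments, cap_idx))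
--
--     return jobs
-- ===== SOURCE B (Python) =====
-- def _job(vids, auds, rows_used, C, A, b, k):
--     cap_idx = (b + k) % C
--     apath = auds[(b + k) % A] if auds else None
--     return (vids[b], apath, rows_used[cap_idx], cap_idx)
--
--
-- def build_deterministic_unique_jobs(vids, auds, rows_used, want):
--     # Round-robin rounds: the t-th pick has video b = t % V and local pick
--     # index k = t // V, so iterate full rounds then a partial round.
--     V = len(vids)
--     C = max(1, len(rows_used))
--     A = len(auds) if auds else 1
--     if V == 0:
--         return []
--     N = min(want, V * C * A)
--     if N <= 0:
--         return []
--     full, rem = divmod(N, V)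
--     jobs = []
--     for k in range(full):
--         for b in range(V):
--             jobs.append(_job(vids, auds, rows_used, C, A, b, k))
--     for b in range(rem):
--         jobs.append(_job(vids, auds, rows_used, C, A, b, full))
--     return jobs
-- ===== Notes on version B (the rewrite author's own statement) =====
-- stated objective: simpler
-- what changed: Replaces A's flat turn loop with its picks_per_video counter array by nested round-robin loops (N//V full rounds over all videos, then a partial round), using that turn t's local pick index is exactly t//V, so the counter state disappears.
import Mathlib
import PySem

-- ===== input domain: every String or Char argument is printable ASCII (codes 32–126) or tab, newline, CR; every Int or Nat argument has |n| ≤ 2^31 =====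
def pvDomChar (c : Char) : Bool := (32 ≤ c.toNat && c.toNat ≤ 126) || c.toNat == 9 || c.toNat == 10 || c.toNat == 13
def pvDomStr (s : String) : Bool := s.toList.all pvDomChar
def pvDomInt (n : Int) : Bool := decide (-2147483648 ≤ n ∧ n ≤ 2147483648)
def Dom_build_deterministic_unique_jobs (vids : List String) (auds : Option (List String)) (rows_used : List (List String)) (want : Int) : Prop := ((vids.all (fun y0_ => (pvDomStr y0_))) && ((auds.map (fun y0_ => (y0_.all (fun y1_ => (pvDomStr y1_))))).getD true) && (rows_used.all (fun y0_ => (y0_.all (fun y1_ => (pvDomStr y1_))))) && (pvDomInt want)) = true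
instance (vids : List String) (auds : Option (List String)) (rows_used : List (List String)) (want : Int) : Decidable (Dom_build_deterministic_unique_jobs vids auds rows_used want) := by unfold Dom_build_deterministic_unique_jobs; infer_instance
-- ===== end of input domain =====

-- B replaces A's flat turn loop with a picks counter by nested round-robin rounds
-- (k full rounds over all videos, then a partial round), using that the local pick
-- index of turn t is exactly t // V; objective: simpler (no counter state).

-- ===== PORT A =====
-- one iteration of A's `for t in range(N)` loop; state = (picks_per_video, jobs)
def pvStepA (vids : List String) (auds : Option (List String)) (rows_used : List (List String))
    (V C A : Int)
    (st : List Int × List (String × Option String × List String × Int)) (t : Int) :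
    List Int × List (String × Option String × List String × Int) :=
  let b := PySem.Int.mod t V
  let k := (PySem.List.pyGet? st.1 b).getD 0
  let picks := st.1.set b.toNat (k + 1)
  let start_c := PySem.Int.mod b C
  let cap_idx := PySem.Int.mod (start_c + k) C
  let apath : Option String :=
    match auds with
    | some l =>
        if l.isEmpty then none
        else
          let start_a := PySem.Int.mod b A
          let aud_idx := PySem.Int.mod (start_a + k) A
          (PySem.List.pyGet? l aud_idx).getD ""   -- in range on Pre_; Python raises only outside Pre_
    | none => none
  let vpath := (PySem.List.pyGet? vids b).getD ""
  let segments := if C > 0 then (PySem.List.pyGet? rows_used cap_idx).getD [] else []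
  (picks, st.2 ++ [(vpath, apath, segments, cap_idx)])

def build_deterministic_unique_jobs (vids : List String) (auds : Option (List String)) (rows_used : List (List String)) (want : Int) : List (String × Option String × List String × Int) :=
  let V : Int := vids.length
  let C : Int := max 1 (rows_used.length : Int)
  let A : Int := match auds with
    | some l => if l.isEmpty then 1 else (l.length : Int)
    | none => 1
  if V = 0 then []
  else
    let N : Int := min want (V * C * A)
    ((PySem.List.pyRange 0 N 1).foldl (pvStepA vids auds rows_used V C A)
      (List.replicate vids.length (0 : Int), [])).2

-- ===== PORT B =====
-- port of Source B's helper `_job`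
def pvJob (vids : List String) (auds : Option (List String)) (rows_used : List (List String))
    (C A : Int) (b k : Int) : String × Option String × List String × Int :=
  let cap_idx := PySem.Int.mod (b + k) C
  let apath : Option String :=
    match auds with
    | some l =>
        if l.isEmpty then none
        else (PySem.List.pyGet? l (PySem.Int.mod (b + k) A)).getD ""   -- in range on Pre_
    | none => none
  ((PySem.List.pyGet? vids b).getD "", apath, (PySem.List.pyGet? rows_used cap_idx).getD [], cap_idx)

def build_deterministic_unique_jobs_alt (vids : List String) (auds : Option (List String)) (rows_used : List (List String)) (want : Int) : List (String × Option String × List String × Int) :=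
  let V : Int := vids.length
  let C : Int := max 1 (rows_used.length : Int)
  let A : Int := match auds with
    | some l => if l.isEmpty then 1 else (l.length : Int)
    | none => 1
  if V = 0 then []
  else
    let N : Int := min want (V * C * A)
    if N ≤ 0 then []
    else
      let full := PySem.Int.floordiv N V
      let rem := PySem.Int.mod N V
      let jobs := (PySem.List.pyRange 0 full 1).foldl
        (fun acc k => (PySem.List.pyRange 0 V 1).foldl
          (fun acc2 b => acc2 ++ [pvJob vids auds rows_used C A b k]) acc) []
      jobs ++ (PySem.List.pyRange 0 rem 1).foldl
        (fun acc b => acc ++ [pvJob vids auds rows_used C A b full]) []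

-- ===== PRECONDITION & SPEC =====
-- Pre_ excludes exactly the inputs where Python A raises IndexError: rows_used = []
-- while at least one job is produced (vids nonempty and want ≥ 1); B raises there too.
def Pre_build_deterministic_unique_jobs (vids : List String) (auds : Option (List String)) (rows_used : List (List String)) (want : Int) : Prop :=
  rows_used ≠ [] ∨ vids = [] ∨ want ≤ 0
instance (vids : List String) (auds : Option (List String)) (rows_used : List (List String)) (want : Int) : Decidable (Pre_build_deterministic_unique_jobs vids auds rows_used want) := by unfold Pre_build_deterministic_unique_jobs; infer_instance
def pvWitness_build_deterministic_unique_jobs : List String × Option (List String) × List (List String) × Int :=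
  (["v1", "v2"], some ["a1"], [["c1"], ["c2"]], 3)

def Spec_build_deterministic_unique_jobs (vids : List String) (auds : Option (List String)) (rows_used : List (List String)) (want : Int) (out : List (String × Option String × List String × Int)) : Prop := out = build_deterministic_unique_jobs_alt vids auds rows_used want
instance (vids : List String) (auds : Option (List String)) (rows_used : List (List String)) (want : Int) (out : List (String × Option String × List String × Int)) : Decidable (Spec_build_deterministic_unique_jobs vids auds rows_used want out) := by unfold Spec_build_deterministic_unique_jobs; infer_instance

-- ===== CLAIM (what is proved, stated in full; the proofs are below) =====
def Claim_equal_build_deterministic_unique_jobs : Prop := ∀ (vids : List String) (auds : Option (List String)) (rows_used : List (List String)) (want : Int), Dom_build_deterministic_unique_jobs vids auds rows_used want → Pre_build_deterministic_unique_jobs vids auds rows_used want → Spec_build_deterministic_unique_jobs vids auds rows_used want (build_deterministic_unique_jobs vids auds rows_used want)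

-- ===== LEMMAS AND PROOFS =====

-- number of turns t' < n with t' % Vn = b (closed form): A's picks_per_video[b] after n turns
def pvNumAt (Vn n b : Nat) : Nat := n / Vn + (if b < n % Vn then 1 else 0)

theorem pvNumAt_zero (Vn b : Nat) : pvNumAt Vn 0 b = 0 := by
  simp [pvNumAt]

theorem pvNumAt_mod (Vn n : Nat) : pvNumAt Vn n (n % Vn) = n / Vn := by
  simp [pvNumAt]

theorem pvNumAt_succ (Vn n b : Nat) (hV : 0 < Vn) (hb : b < Vn) :
    pvNumAt Vn (n+1) b = pvNumAt Vn n b + (if b = n % Vn then 1 else 0) := by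
  have hqr : Vn * (n / Vn) + n % Vn = n := Nat.div_add_mod n Vn
  have hr : n % Vn < Vn := Nat.mod_lt _ hV
  have hsub : n + 1 = Vn * (n / Vn) + n % Vn + 1 := by rw [hqr]
  by_cases hrr : n % Vn + 1 = Vn
  · have hd : (n+1) / Vn = n / Vn + 1 := by
      rw [hsub, Nat.add_assoc, hrr, Nat.mul_add_div hV, Nat.div_self hV]
    have hm : (n+1) % Vn = 0 := by
      rw [hsub, Nat.add_assoc, hrr, Nat.mul_add_mod, Nat.mod_self]
    simp only [pvNumAt, hd, hm]
    split_ifs <;> omega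
  · have hlt : n % Vn + 1 < Vn := Nat.lt_of_le_of_ne (Nat.succ_le_of_lt hr) hrr
    have hd : (n+1) / Vn = n / Vn := by
      rw [hsub, Nat.add_assoc, Nat.mul_add_div hV, Nat.div_eq_of_lt hlt]
      exact Nat.add_zero _
    have hm : (n+1) % Vn = n % Vn + 1 := by
      rw [hsub, Nat.add_assoc, Nat.mul_add_mod, Nat.mod_eq_of_lt hlt]
    simp only [pvNumAt, hd, hm]
    split_ifs <;> omega

-- A's loop, run for n turns, yields the pvNumAt counters and the pvJob jobs
theorem pvFoldA (vids : List String) (auds : Option (List String)) (rows_used : List (List String))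
    (C A : Int) (hV : 0 < vids.length) (hC : 0 < C) (hA : 0 < A) (n : Nat) :
    (List.range n).foldl
        (fun st (t : Nat) => pvStepA vids auds rows_used (vids.length : Int) C A st (t : Int))
        (List.replicate vids.length (0 : Int), []) =
      ((List.range vids.length).map (fun b => ((pvNumAt vids.length n b : Nat) : Int)),
       (List.range n).map (fun t =>
         pvJob vids auds rows_used C A ((t % vids.length : Nat) : Int) ((t / vids.length : Nat) : Int))) := by
  have hmodC : ∀ x y : Int, PySem.Int.mod (PySem.Int.mod x C + y) C = PySem.Int.mod (x + y) C := by
    intro x y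
    rw [PySem.Int.mod_eq_emod_of_pos hC, PySem.Int.mod_eq_emod_of_pos hC,
      PySem.Int.mod_eq_emod_of_pos hC, Int.emod_add_emod]
  have hmodA : ∀ x y : Int, PySem.Int.mod (PySem.Int.mod x A + y) A = PySem.Int.mod (x + y) A := by
    intro x y
    rw [PySem.Int.mod_eq_emod_of_pos hA, PySem.Int.mod_eq_emod_of_pos hA,
      PySem.Int.mod_eq_emod_of_pos hA, Int.emod_add_emod]
  induction n with
  | zero =>
    simp [pvNumAt_zero]
  | succ n ih =>
    rw [List.range_succ, List.foldl_append, ih, List.foldl_cons, List.foldl_nil]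
    have hmlt : n % vids.length < vids.length := Nat.mod_lt _ hV
    have hb : PySem.Int.mod ((n : Nat) : Int) ((vids.length : Nat) : Int) =
        ((n % vids.length : Nat) : Int) := PySem.Int.mod_natCast n vids.length
    have hk : (PySem.List.pyGet?
          ((List.range vids.length).map (fun b => ((pvNumAt vids.length n b : Nat) : Int)))
          ((n % vids.length : Nat) : Int)).getD 0 = ((n / vids.length : Nat) : Int) := by
      rw [PySem.List.pyGet?_natCast]
      simp [List.getElem?_map, List.getElem?_range, hmlt, pvNumAt_mod]
    simp only [pvStepA, hb, hk, Int.toNat_natCast]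
    refine Prod.ext ?_ ?_
    · -- counters
      refine List.ext_getElem (by simp) ?_
      intro i h1 h2
      simp only [List.length_set, List.length_map, List.length_range] at h1 h2
      rw [List.getElem_set]
      simp only [List.getElem_map, List.getElem_range]
      split_ifs with hi
      · subst hi
        rw [pvNumAt_succ _ _ _ hV hmlt, pvNumAt_mod, if_pos rfl]
        push_cast
        ring
      · rw [pvNumAt_succ _ _ _ hV h2, if_neg (fun h => hi h.symm), Nat.add_zero]
    · -- jobs
      simp only [List.map_append, List.map_cons, List.map_nil]
      congr 1
      simp only [pvJob, hmodC, hmodA, if_pos hC]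

-- splitting the flat turn range into full rounds plus a partial round
theorem pvRangeSplit {α : Type} (Vn : Nat) (hV : 0 < Vn) :
    ∀ (q : Nat) (g : Nat → Nat → α) (r : Nat), r ≤ Vn →
      (List.range (Vn * q + r)).map (fun t => g (t % Vn) (t / Vn)) =
        (List.range q).flatMap (fun k => (List.range Vn).map (fun b => g b k)) ++
          (List.range r).map (fun b => g b q) := by
  intro q
  induction q with
  | zero =>
    intro g r hr
    simp only [Nat.mul_zero, Nat.zero_add, List.range_zero, List.flatMap_nil, List.nil_append]
    refine List.map_congr_left ?_
    intro t ht
    have ht' : t < Vn := Nat.lt_of_lt_of_le (List.mem_range.mp ht) hr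
    rw [Nat.mod_eq_of_lt ht', Nat.div_eq_of_lt ht']
  | succ q ih =>
    intro g r hr
    have hsplit : Vn * (q + 1) + r = Vn + (Vn * q + r) := by ring
    rw [hsplit, List.range_add, List.map_append, List.map_map]
    have h1 : (List.range Vn).map (fun t => g (t % Vn) (t / Vn)) =
        (List.range Vn).map (fun b => g b 0) := by
      refine List.map_congr_left ?_
      intro t ht
      have ht' : t < Vn := List.mem_range.mp ht
      rw [Nat.mod_eq_of_lt ht', Nat.div_eq_of_lt ht']
    have h2 : (List.range (Vn * q + r)).map
          ((fun t => g (t % Vn) (t / Vn)) ∘ (fun x => Vn + x)) =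
        (List.range (Vn * q + r)).map (fun t => (fun b k => g b (k + 1)) (t % Vn) (t / Vn)) := by
      refine List.map_congr_left ?_
      intro t _
      simp only [Function.comp]
      rw [Nat.add_mod_left, Nat.add_div_left _ hV]
    rw [h1, h2, ih (fun b k => g b (k + 1)) r hr]
    rw [List.range_succ_eq_map, List.flatMap_cons, List.flatMap_map, List.append_assoc]

-- ===== VERDICT (by name: the statement is the Claim_ definition above) =====
theorem build_deterministic_unique_jobs_spec : Claim_equal_build_deterministic_unique_jobs := by
  unfold Claim_equal_build_deterministic_unique_jobs
  intro vids auds rows_used want _ _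
  unfold Spec_build_deterministic_unique_jobs
  unfold build_deterministic_unique_jobs build_deterministic_unique_jobs_alt
  by_cases hV0 : (vids.length : Int) = 0
  · simp [hV0]
  · simp only [hV0, if_neg hV0, ite_false]
    have hV : 0 < vids.length := by
      rcases Nat.eq_zero_or_pos vids.length with h | h
      · exact absurd (by exact_mod_cast h) hV0
      · exact h
    set C := max 1 (rows_used.length : Int) with hCdef
    set A := (match auds with
      | some l => if l.isEmpty then (1 : Int) else (l.length : Int)
      | none => (1 : Int)) with hAdef
    have hC : 0 < C := lt_of_lt_of_le one_pos (le_max_left 1 _)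
    have hA : 0 < A := by
      rcases auds with _ | l
      · simp [hAdef]
      · rcases l with _ | ⟨x, l⟩ <;> simp [hAdef]
    set N := min want ((vids.length : Int) * C * A) with hNdef
    by_cases hN : N ≤ 0
    · rw [PySem.List.pyRange_one_eq_nil hN, if_pos hN]
      simp
    · push_neg at hN
      rw [if_neg (not_le.mpr hN)]
      have hNn : N = ((N.toNat : Nat) : Int) := (Int.toNat_of_nonneg (le_of_lt hN)).symm
      -- A side: the flat loop is the fold over List.range N.toNat
      have hAside :
          ((PySem.List.pyRange 0 N 1).foldl
              (pvStepA vids auds rows_used (vids.length : Int) C A)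
              (List.replicate vids.length (0 : Int), [])).2 =
            (List.range N.toNat).map (fun t =>
              pvJob vids auds rows_used C A ((t % vids.length : Nat) : Int)
                ((t / vids.length : Nat) : Int)) := by
        rw [PySem.List.pyRange_one, List.foldl_map]
        simp only [Int.sub_zero, Int.zero_add, zero_add]
        rw [pvFoldA vids auds rows_used C A hV hC hA N.toNat]
      rw [hAside]
      -- B side: rewrite the nested folds into flatMap/map over Nat ranges
      rw [hNn]
      simp only [PySem.Int.floordiv_natCast, PySem.Int.mod_natCast]
      simp only [PySem.List.foldl_append_singleton_eq_map]
      rw [PySem.List.foldl_append_eq_flatMap]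
      simp only [PySem.List.pyRange_one, Int.sub_zero, Int.toNat_natCast, zero_add,
        List.flatMap_map, List.map_map]
      rw [List.nil_append]
      -- split the flat range into rounds
      have hsplit := pvRangeSplit vids.length hV (N.toNat / vids.length)
        (fun b k => pvJob vids auds rows_used C A (b : Int) (k : Int))
        (N.toNat % vids.length) (le_of_lt (Nat.mod_lt _ hV))
      have hdm : vids.length * (N.toNat / vids.length) + N.toNat % vids.length = N.toNat := by
        exact Nat.div_add_mod N.toNat vids.length
      rw [hdm] at hsplit
      exact hsplit
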